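-- pv_equiv track=rewrite | github.com/Ashley0909/DG-CoLearn | graph_partition.py | connect_graphs
-- ===== SOURCE A (Python) =====
-- def connect_graphs(splittable_cc, adj_list):
--     '''Link all the connected components.'''
--     synthetic_edges = []
--     for i, cc in enumerate(splittable_cc):
--         if i == 0:
--             last = list(cc)[-1] # record the last element for linking
--         else:
--             # Create an undirected edge that connects the last element of previous cc and the first element of current cc
--             first = list(cc)[0]
--             adj_list[first].append(last)
--             adj_list[last].append(first)
--             synthetic_edges.append((first, last))
--             synthetic_edges.append((last, first))
--             last = list(cc)[-1]
--
--     return adj_list, synthetic_edges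
-- ===== SOURCE B (Python) =====
-- def _link_edges(ccs):
--     '''Recursively derive the synthetic edges from the endpoints of consecutive components.'''
--     if len(ccs) < 2:
--         return []
--     first = list(ccs[1])[0]
--     last = list(ccs[0])[-1]
--     return [(first, last), (last, first)] + _link_edges(ccs[1:])
--
-- def connect_graphs(splittable_cc, adj_list):
--     '''Link all the connected components.'''
--     # B (alternative decomposition): stage 1 derives the whole synthetic edge list
--     # recursively, without touching adj_list; stage 2 replays each directed edge
--     # (u, v) as one append of v to adj_list[u].  Like A, adj_list is mutated in place.
--     synthetic_edges = _link_edges(splittable_cc)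
--     for u, v in synthetic_edges:
--         adj_list[u].append(v)
--     return adj_list, synthetic_edges
-- ===== Notes on version B (the rewrite author's own statement) =====
-- stated objective: alternative
-- what changed: B is two staged passes: a recursive helper derives the complete synthetic edge list from component endpoints without touching adj_list, and a second loop replays each directed edge (u,v) as one append of v to adj_list[u], replacing A's single interleaved enumerate loop with carried state.
import Mathlib
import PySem

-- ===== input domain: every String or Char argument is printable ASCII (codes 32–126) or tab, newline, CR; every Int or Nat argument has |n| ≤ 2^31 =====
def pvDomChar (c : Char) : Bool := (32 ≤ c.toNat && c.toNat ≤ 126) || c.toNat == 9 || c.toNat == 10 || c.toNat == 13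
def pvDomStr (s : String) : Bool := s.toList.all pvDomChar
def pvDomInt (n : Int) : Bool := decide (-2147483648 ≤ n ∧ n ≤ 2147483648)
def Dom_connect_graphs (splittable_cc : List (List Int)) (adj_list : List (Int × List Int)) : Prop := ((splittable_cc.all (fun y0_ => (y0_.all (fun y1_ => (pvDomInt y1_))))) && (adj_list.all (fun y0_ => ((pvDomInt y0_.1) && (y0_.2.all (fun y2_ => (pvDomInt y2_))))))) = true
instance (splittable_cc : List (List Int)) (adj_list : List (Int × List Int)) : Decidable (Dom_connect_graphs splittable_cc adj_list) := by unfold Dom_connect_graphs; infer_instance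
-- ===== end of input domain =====

-- B decomposes A's single interleaved loop into two staged passes (recursive edge
-- derivation, then a replay of the edges onto adj_list); same cost, different shape.
-- Both Pythons mutate adj_list in place; the equivalence is about the returned pair.

-- ===== PORT A =====
-- Loop body of A's `for i, cc in enumerate(...)`.  State: (adj dict, synthetic_edges, last).
-- `list(cc)[-1]` / `list(cc)[0]` → pyGet?; `.getD 0` stands for the IndexError/KeyError
-- cases, which Pre_ excludes (Python raises there).
def connectA_step (st : PySem.Dict Int (List Int) × List (Int × Int) × Int)
    (p : Int × List Int) : PySem.Dict Int (List Int) × List (Int × Int) × Int :=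
  if p.1 == 0 then
    (st.1, st.2.1, (PySem.List.pyGet? p.2 (-1)).getD 0)
  else
    let last := st.2.2
    let first := (PySem.List.pyGet? p.2 0).getD 0
    let d := PySem.Dict.modify st.1 first [] (fun l => l ++ [last])
    let d := PySem.Dict.modify d last [] (fun l => l ++ [first])
    (d, st.2.1 ++ [(first, last), (last, first)], (PySem.List.pyGet? p.2 (-1)).getD 0)

def connect_graphs (splittable_cc : List (List Int)) (adj_list : List (Int × List Int)) : (List (Int × List Int)) × (List (Int × Int)) :=
  let st := (PySem.List.enumerate splittable_cc 0).foldl connectA_step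
    (PySem.Dict.mk adj_list, [], 0)
  (st.1.items, st.2.1)

-- ===== PORT B =====
-- Source B's recursive `_link_edges`: ccs[1] → pyGet? 1, ccs[0] → pyGet? 0, ccs[1:] → slice
def link_edges (ccs : List (List Int)) : List (Int × Int) :=
  if ccs.length < 2 then []
  else
    let first := (PySem.List.pyGet? ((PySem.List.pyGet? ccs 1).getD []) 0).getD 0
    let last := (PySem.List.pyGet? ((PySem.List.pyGet? ccs 0).getD []) (-1)).getD 0
    [(first, last), (last, first)] ++ link_edges (PySem.List.slice ccs (some 1) none)
termination_by ccs.length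
decreasing_by simp [PySem.List.slice_from_one]; omega

def connect_graphs_alt (splittable_cc : List (List Int)) (adj_list : List (Int × List Int)) : (List (Int × List Int)) × (List (Int × Int)) :=
  let edges := link_edges splittable_cc
  let d := edges.foldl
    (fun d e => PySem.Dict.modify d e.1 [] (fun l => l ++ [e.2]))
    (PySem.Dict.mk adj_list)
  (d.items, edges)

-- ===== PRECONDITION & SPEC =====
-- Pre_ excludes exactly the inputs where the Python A raises: an empty component
-- (IndexError on list(cc)[0]/[-1]) or a linked endpoint absent from adj_list (KeyError).
def Pre_connect_graphs (splittable_cc : List (List Int)) (adj_list : List (Int × List Int)) : Prop :=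
  ((splittable_cc.all (fun cc => !cc.isEmpty)) &&
   ((splittable_cc.zip splittable_cc.tail).all (fun p =>
      (adj_list.map Prod.fst).contains (p.1.getLastD 0) &&
      (adj_list.map Prod.fst).contains (p.2.headD 0)))) = true
instance (splittable_cc : List (List Int)) (adj_list : List (Int × List Int)) : Decidable (Pre_connect_graphs splittable_cc adj_list) := by unfold Pre_connect_graphs; infer_instance

def pvWitness_connect_graphs : List (List Int) × (List (Int × List Int)) :=
  ([[1, 2], [3], [4, 5]], [(1, [2]), (2, [1]), (3, []), (4, [5]), (5, [4])])

def Spec_connect_graphs (splittable_cc : List (List Int)) (adj_list : List (Int × List Int)) (out : (List (Int × List Int)) × (List (Int × Int))) : Prop := out = connect_graphs_alt splittable_cc adj_list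
instance (splittable_cc : List (List Int)) (adj_list : List (Int × List Int)) (out : (List (Int × List Int)) × (List (Int × Int))) : Decidable (Spec_connect_graphs splittable_cc adj_list out) := by unfold Spec_connect_graphs; infer_instance

-- ===== CLAIM (what is proved, stated in full; the proofs are below) =====
def Claim_equal_connect_graphs : Prop := ∀ (splittable_cc : List (List Int)) (adj_list : List (Int × List Int)), Dom_connect_graphs splittable_cc adj_list → Pre_connect_graphs splittable_cc adj_list → Spec_connect_graphs splittable_cc adj_list (connect_graphs splittable_cc adj_list)

-- ===== LEMMAS AND PROOFS =====

-- The edge chain headed by a carried endpoint `lastv`: the common intermediate spec.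
def chainEdges (lastv : Int) : List (List Int) → List (Int × Int)
  | [] => []
  | c :: rest =>
      ((PySem.List.pyGet? c 0).getD 0, lastv) ::
      (lastv, (PySem.List.pyGet? c 0).getD 0) ::
      chainEdges ((PySem.List.pyGet? c (-1)).getD 0) rest

-- replay of a directed edge list onto the dict (B's second pass, as a fold)
def replay (edges : List (Int × Int)) (d : PySem.Dict Int (List Int)) : PySem.Dict Int (List Int) :=
  edges.foldl (fun d e => PySem.Dict.modify d e.1 [] (fun l => l ++ [e.2])) d

theorem link_edges_cons (c : List Int) (rest : List (List Int)) :
    link_edges (c :: rest) = chainEdges ((PySem.List.pyGet? c (-1)).getD 0) rest := by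
  induction rest generalizing c with
  | nil => simp [link_edges, chainEdges]
  | cons c' rest ih =>
      rw [link_edges]
      rw [show ((1:Int)) = ((0:Int)+1) by norm_num]
      simp [PySem.List.slice_from_one, chainEdges, ih c',
        PySem.List.pyGet?_zero_cons]

-- A's fold, once past the i == 0 step, produces the chain edges, their replay on the
-- dict, and the last endpoint; the index n ≥ 1 only ensures the i == 0 branch is dead.
theorem connectA_loop_eq (rest : List (List Int)) (n : Int) (hn : 1 ≤ n)
    (d : PySem.Dict Int (List Int)) (es : List (Int × Int)) (lastv : Int) :
    (PySem.List.enumerate rest n).foldl connectA_step (d, es, lastv) =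
      (replay (chainEdges lastv rest) d, es ++ chainEdges lastv rest,
       match rest with
       | [] => lastv
       | _ => (PySem.List.pyGet? (rest.getLastD []) (-1)).getD 0) := by
  induction rest generalizing n d es lastv with
  | nil => simp [PySem.List.enumerate_nil, chainEdges, replay]
  | cons c rest ih =>
      have hne : (n == 0) = false := by simp; omega
      simp only [PySem.List.enumerate_cons, List.foldl_cons]
      rw [show connectA_step (d, es, lastv) (n, c) =
          (replay [((PySem.List.pyGet? c 0).getD 0, lastv),
                   (lastv, (PySem.List.pyGet? c 0).getD 0)] d,
           es ++ [((PySem.List.pyGet? c 0).getD 0, lastv),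
                  (lastv, (PySem.List.pyGet? c 0).getD 0)],
           (PySem.List.pyGet? c (-1)).getD 0) by
        simp [connectA_step, hne, replay]]
      rw [ih (n + 1) (by omega)]
      rcases rest with _ | ⟨c', rest'⟩ <;>
        simp [chainEdges, replay, List.getLastD]

theorem connect_graphs_eq (splittable_cc : List (List Int)) (adj_list : List (Int × List Int)) :
    connect_graphs splittable_cc adj_list = connect_graphs_alt splittable_cc adj_list := by
  cases splittable_cc with
  | nil =>
      simp [connect_graphs, connect_graphs_alt, PySem.List.enumerate_nil, link_edges]
  | cons c rest =>
      unfold connect_graphs connect_graphs_alt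
      simp only [PySem.List.enumerate_cons, List.foldl_cons, link_edges_cons]
      rw [show connectA_step (PySem.Dict.mk adj_list, [], 0) ((0 : Int), c) =
          (PySem.Dict.mk adj_list, [], (PySem.List.pyGet? c (-1)).getD 0) by
        simp [connectA_step]]
      rw [connectA_loop_eq rest (0 + 1) (by omega)]
      simp [replay]

-- ===== VERDICT (by name: the statement is the Claim_ definition above) =====
theorem connect_graphs_spec : Claim_equal_connect_graphs := by
  intro scc adj _ _
  unfold Spec_connect_graphs
  exact connect_graphs_eq scc adj
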